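-- pv_equiv track=rewrite | github.com/jmurga/flexsweep | flexsweep/enrichment.py | _count_sweep_events
-- ===== SOURCE A (Python) =====
-- def _count_sweep_events(query_genes: set, sweep_genes: set, neighbor_map: dict) -> int:
--     """
--     Count distinct sweep events = connected components of the neighbour graph
--     restricted to `sweep_genes`, that are touched by at least one gene from
--     `query_genes`.
--
--     Each connected component in the sub-graph of sweep_genes (using neighbor_map
--     edges) is a single sweep event.  We count components that share at least one
--     gene with query_genes.
--     """
--     visited: set = set()
--     count = 0
--     for g in query_genes:
--         if g not in sweep_genes or g in visited:
--             continue
--         # DFS to find the connected component of g within sweep_genes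
--         stack = [g]
--         while stack:
--             node = stack.pop()
--             if node in visited or node not in sweep_genes:
--                 continue
--             visited.add(node)
--             stack.extend(neighbor_map.get(node, set()) - visited)
--         count += 1
--     return count
-- ===== SOURCE B (Python) =====
-- def _count_sweep_events(query_genes, sweep_genes, neighbor_map):
--     """Count touched sweep components by per-seed least-fixpoint closure:
--     repeatedly expand the whole current set by one neighbour step until stable
--     (at most len(sweep_genes) rounds), instead of a worklist DFS."""
--     def closure(g):
--         comp = {g}
--         for _ in range(len(sweep_genes)):
--             new = {y for x in comp
--                      for y in neighbor_map.get(x, set())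
--                      if y in sweep_genes and y not in comp}
--             if not new:
--                 break
--             comp |= new
--         return comp
--
--     seen = set()
--     count = 0
--     for g in query_genes:
--         if g in sweep_genes and g not in seen:
--             count += 1
--             seen |= closure(g)
--     return count
-- ===== Notes on version B (the rewrite author's own statement) =====
-- stated objective: alternative
-- what changed: A runs a shared-visited explicit-stack DFS per seed; B has no worklist at all: each seed's component is computed as a least fixpoint by repeatedly expanding the whole current set with a one-neighbour-step set comprehension until no new gene appears (at most len(sweep_genes) rounds), then unioned into a seen set.
import Mathlib
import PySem

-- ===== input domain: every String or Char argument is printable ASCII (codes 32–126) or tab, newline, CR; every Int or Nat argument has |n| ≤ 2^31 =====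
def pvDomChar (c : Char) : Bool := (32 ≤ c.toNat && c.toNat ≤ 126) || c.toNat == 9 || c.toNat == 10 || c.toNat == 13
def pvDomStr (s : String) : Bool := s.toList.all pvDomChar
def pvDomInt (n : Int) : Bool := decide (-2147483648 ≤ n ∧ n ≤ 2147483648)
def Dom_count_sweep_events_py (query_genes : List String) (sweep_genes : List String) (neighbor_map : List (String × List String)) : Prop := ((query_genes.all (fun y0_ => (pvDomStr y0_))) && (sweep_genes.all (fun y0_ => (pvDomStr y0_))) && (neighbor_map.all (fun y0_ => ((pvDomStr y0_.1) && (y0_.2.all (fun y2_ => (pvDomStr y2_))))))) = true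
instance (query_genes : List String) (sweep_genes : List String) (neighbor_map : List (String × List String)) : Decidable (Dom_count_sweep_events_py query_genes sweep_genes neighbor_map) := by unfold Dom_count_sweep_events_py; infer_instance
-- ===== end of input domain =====

-- B replaces A's shared-visited explicit-stack DFS by a worklist-free least-fixpoint closure:
-- each seed's component is grown by whole-set one-neighbour-step expansion rounds until stable
-- (at most |sweep_genes| rounds), then unioned into a `seen` set (objective: alternative).
-- Python set-iteration order is not observable in the result (count is membership-determined),
-- so both ports iterate stored list order; this is exact.

-- helper lemmas the ports need for termination (cited in decreasing_by)
theorem pvLenFilterLe {α : Type} (l : List α) (p q : α → Bool)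
    (himp : ∀ x, p x = true → q x = true) :
    (l.filter p).length ≤ (l.filter q).length := by
  induction l with
  | nil => simp
  | cons a l ih =>
    by_cases hp : p a = true
    · simp [hp, himp a hp]; omega
    · simp only [List.filter_cons, Bool.not_eq_true] at *
      cases hq : q a <;> simp [hp] <;> omega

theorem pvLenFilterLt {α : Type} (l : List α) (p q : α → Bool)
    (himp : ∀ x, p x = true → q x = true)
    (x : α) (hx : x ∈ l) (hqx : q x = true) (hpx : p x = false) :
    (l.filter p).length < (l.filter q).length := by
  induction l with
  | nil => cases hx
  | cons a l ih =>
    rcases List.mem_cons.mp hx with rfl | hx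
    · have h1 := pvLenFilterLe l p q himp
      simp [hpx, hqx]; omega
    · have h1 := ih hx
      by_cases hp : p a = true
      · simp [hp, himp a hp]; omega
      · simp only [Bool.not_eq_true] at hp
        cases hq : q a <;> simp [hp, hq] <;> omega

theorem pvAddFilterLt {sweep visited : List String} {node : String}
    (h1 : node ∈ sweep) (h2 : node ∉ visited) :
    (sweep.filter (fun x => !((PySem.Set.add visited node).contains x))).length <
      (sweep.filter (fun x => !(visited.contains x))).length := by
  apply pvLenFilterLt _ _ _ ?_ node h1 ?_ ?_
  · intro x hpx
    revert hpx
    simp [PySem.Set.mem_add]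
    tauto
  · simp [h2]
  · simp [PySem.Set.mem_add]

-- ===== PORT A =====
-- transliteration of A's DFS 'while stack' loop; the stack is stored top-first
-- (Python pops from the tail and extends at the tail, so extend = reversed-cons here; exact)
def aDfs (sweep : List String) (nm : List (String × List String))
    (visited : List String) (stack : List String) : List String :=
  match stack with
  | [] => visited
  | node :: rest =>
    if node ∈ visited ∨ node ∉ sweep then aDfs sweep nm visited rest
    else
      let visited' := PySem.Set.add visited node
      aDfs sweep nm visited'
        ((PySem.Set.diff (PySem.Dict.getD ⟨nm⟩ node []) visited').reverse ++ rest)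
termination_by ((sweep.filter (fun x => !(visited.contains x))).length, stack.length)
decreasing_by
  · apply Prod.Lex.right; simp
  · rename_i h
    have hnv : node ∉ visited := fun hv => h (Or.inl hv)
    have hns : node ∈ sweep := not_not.mp fun hs => h (Or.inr hs)
    exact Prod.Lex.left _ _ (pvAddFilterLt hns hnv)

def count_sweep_events_py (query_genes : List String) (sweep_genes : List String)
    (neighbor_map : List (String × List String)) : Int :=
  (query_genes.foldl
    (fun (st : List String × Int) g =>
      if g ∉ sweep_genes ∨ g ∈ st.1 then st
      else (aDfs sweep_genes neighbor_map st.1 [g], st.2 + 1))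
    ([], 0)).2

-- ===== PORT B =====
-- B's set comprehension {y for x in comp for y in nm.get(x,set()) if y in sweep and y not in comp}
def bNewSet (sweep : List String) (nm : List (String × List String))
    (comp : List String) : List String :=
  comp.foldl
    (fun acc x =>
      (PySem.Dict.getD ⟨nm⟩ x []).foldl
        (fun acc2 y => if y ∈ sweep ∧ y ∉ comp then PySem.Set.add acc2 y else acc2)
        acc)
    PySem.Set.empty

-- B's 'for _ in range(len(sweep_genes))' expansion loop with the 'if not new: break'
def bIter (sweep : List String) (nm : List (String × List String)) :
    Nat → List String → List String
  | 0, comp => comp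
  | k + 1, comp =>
    let nw := bNewSet sweep nm comp
    if nw = [] then comp else bIter sweep nm k (PySem.Set.union comp nw)

-- B's closure(g)
def bClosure (sweep : List String) (nm : List (String × List String)) (g : String) : List String :=
  bIter sweep nm sweep.length [g]

def count_sweep_events_py_alt (query_genes : List String) (sweep_genes : List String)
    (neighbor_map : List (String × List String)) : Int :=
  (query_genes.foldl
    (fun (st : List String × Int) g =>
      if g ∈ sweep_genes ∧ g ∉ st.1 then
        (PySem.Set.union st.1 (bClosure sweep_genes neighbor_map g), st.2 + 1)
      else st)
    ([], 0)).2

-- ===== PRECONDITION & SPEC =====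
def Spec_count_sweep_events_py (query_genes : List String) (sweep_genes : List String) (neighbor_map : List (String × List String)) (out : Int) : Prop := out = count_sweep_events_py_alt query_genes sweep_genes neighbor_map
instance (query_genes : List String) (sweep_genes : List String) (neighbor_map : List (String × List String)) (out : Int) : Decidable (Spec_count_sweep_events_py query_genes sweep_genes neighbor_map out) := by unfold Spec_count_sweep_events_py; infer_instance

-- ===== CLAIM (what is proved, stated in full; the proofs are below) =====
def Claim_equal_count_sweep_events_py : Prop := ∀ (query_genes : List String) (sweep_genes : List String) (neighbor_map : List (String × List String)), Dom_count_sweep_events_py query_genes sweep_genes neighbor_map → Spec_count_sweep_events_py query_genes sweep_genes neighbor_map (count_sweep_events_py query_genes sweep_genes neighbor_map)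

-- ===== LEMMAS AND PROOFS =====

-- a predicate is "closed" when it is stable under sweep-internal neighbour edges
def ClosedP (sweep : List String) (nm : List (String × List String)) (T : String → Prop) : Prop :=
  ∀ x, T x → x ∈ sweep → ∀ y ∈ PySem.Dict.getD ⟨nm⟩ x [], y ∈ sweep → T y

theorem aDfs_grow (sweep : List String) (nm : List (String × List String)) :
    ∀ visited stack, ∀ x ∈ visited, x ∈ aDfs sweep nm visited stack := by
  intro visited stack
  induction visited, stack using aDfs.induct sweep nm with
  | case1 visited => intro x hx; rw [aDfs]; exact hx
  | case2 visited node rest h ih =>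
    intro x hx
    rw [aDfs, if_pos h]
    exact ih x hx
  | case3 visited node rest h visited2 ih =>
    intro x hx
    rw [aDfs, if_neg h]
    exact ih x ((PySem.Set.mem_add _ _ _).mpr (Or.inl hx))

theorem aDfs_stack (sweep : List String) (nm : List (String × List String)) :
    ∀ visited stack, ∀ g ∈ stack, g ∈ sweep → g ∈ aDfs sweep nm visited stack := by
  intro visited stack
  induction visited, stack using aDfs.induct sweep nm with
  | case1 visited => intro g hg; cases hg
  | case2 visited node rest h ih =>
    intro g hg hgs
    rw [aDfs, if_pos h]
    rcases List.mem_cons.mp hg with rfl | hg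
    · rcases h with h | h
      · exact aDfs_grow sweep nm visited rest g h
      · exact absurd hgs h
    · exact ih g hg hgs
  | case3 visited node rest h visited2 ih =>
    intro g hg hgs
    rw [aDfs, if_neg h]
    rcases List.mem_cons.mp hg with rfl | hg
    · refine aDfs_grow sweep nm _ _ g ?_
      exact (PySem.Set.mem_add _ _ _).mpr (Or.inr rfl)
    · exact ih g (List.mem_append_right _ hg) hgs

theorem aDfs_bound (sweep : List String) (nm : List (String × List String)) :
    ∀ visited stack, ∀ x ∈ aDfs sweep nm visited stack, x ∈ visited ∨ x ∈ sweep := by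
  intro visited stack
  induction visited, stack using aDfs.induct sweep nm with
  | case1 visited => intro x hx; rw [aDfs] at hx; exact Or.inl hx
  | case2 visited node rest h ih =>
    intro x hx
    rw [aDfs, if_pos h] at hx
    exact ih x hx
  | case3 visited node rest h visited2 ih =>
    intro x hx
    rw [aDfs, if_neg h] at hx
    have hns : node ∈ sweep := not_not.mp fun hs => h (Or.inr hs)
    rcases ih x hx with hv | hs
    · rcases (PySem.Set.mem_add _ _ _).mp hv with hv | rfl
      · exact Or.inl hv
      · exact Or.inr hns
    · exact Or.inr hs

theorem aDfs_closed (sweep : List String) (nm : List (String × List String)) :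
    ∀ visited stack,
      (∀ x ∈ visited, x ∈ sweep → ∀ y ∈ PySem.Dict.getD ⟨nm⟩ x [], y ∈ sweep →
          y ∈ visited ∨ y ∈ stack) →
      ClosedP sweep nm (· ∈ aDfs sweep nm visited stack) := by
  intro visited stack
  induction visited, stack using aDfs.induct sweep nm with
  | case1 visited =>
    intro hInv x hx hxs y hy hys
    rw [aDfs] at hx ⊢
    rcases hInv x hx hxs y hy hys with h | h
    · exact h
    · cases h
  | case2 visited node rest h ih =>
    intro hInv
    rw [aDfs, if_pos h]
    apply ih
    intro x hx hxs y hy hys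
    rcases hInv x hx hxs y hy hys with hv | hns
    · exact Or.inl hv
    · rcases List.mem_cons.mp hns with rfl | hr
      · rcases h with h | h
        · exact Or.inl h
        · exact absurd hys h
      · exact Or.inr hr
  | case3 visited node rest h visited2 ih =>
    intro hInv
    rw [aDfs, if_neg h]
    apply ih
    intro x hx hxs y hy hys
    rcases (PySem.Set.mem_add _ _ _).mp hx with hx | rfl
    · rcases hInv x hx hxs y hy hys with hv | hns
      · exact Or.inl ((PySem.Set.mem_add _ _ _).mpr (Or.inl hv))
      · rcases List.mem_cons.mp hns with rfl | hr
        · exact Or.inl ((PySem.Set.mem_add _ _ _).mpr (Or.inr rfl))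
        · exact Or.inr (List.mem_append_right _ hr)
    · by_cases hyv : y ∈ PySem.Set.add visited x
      · exact Or.inl hyv
      · refine Or.inr (List.mem_append_left _ ?_)
        rw [List.mem_reverse]
        exact (PySem.Set.mem_diff _ _ _).mpr ⟨hy, hyv⟩

theorem aDfs_min (sweep : List String) (nm : List (String × List String)) :
    ∀ visited stack (T : String → Prop), ClosedP sweep nm T →
      (∀ x ∈ visited, T x) → (∀ g ∈ stack, g ∈ sweep → T g) →
      ∀ x ∈ aDfs sweep nm visited stack, T x := by
  intro visited stack
  induction visited, stack using aDfs.induct sweep nm with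
  | case1 visited =>
    intro T _ hv _ x hx
    rw [aDfs] at hx
    exact hv x hx
  | case2 visited node rest h ih =>
    intro T hT hv hs x hx
    rw [aDfs, if_pos h] at hx
    exact ih T hT hv (fun g hg => hs g (List.mem_cons_of_mem _ hg)) x hx
  | case3 visited node rest h visited2 ih =>
    intro T hT hv hs x hx
    rw [aDfs, if_neg h] at hx
    have hns : node ∈ sweep := not_not.mp fun hh => h (Or.inr hh)
    have hTnode : T node := hs node List.mem_cons_self hns
    refine ih T hT ?_ ?_ x hx
    · intro z hz
      rcases (PySem.Set.mem_add _ _ _).mp hz with hz | rfl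
      · exact hv z hz
      · exact hTnode
    · intro g hg hgs
      rcases List.mem_append.mp hg with hg | hg
      · rw [List.mem_reverse] at hg
        have := (PySem.Set.mem_diff _ _ _).mp hg
        exact hT node hTnode hns g this.1 hgs
      · exact hs g (List.mem_cons_of_mem _ hg) hgs

-- membership characterisation of B's one-step comprehension
theorem pvMemNewSet {sweep : List String} {nm : List (String × List String)}
    {comp : List String} {x : String} :
    x ∈ bNewSet sweep nm comp ↔
      ∃ n ∈ comp, x ∈ PySem.Dict.getD ⟨nm⟩ n [] ∧ x ∈ sweep ∧ x ∉ comp := by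
  have inner : ∀ (l acc : List String),
      x ∈ l.foldl (fun acc2 nb => if nb ∈ sweep ∧ nb ∉ comp then PySem.Set.add acc2 nb else acc2) acc
        ↔ x ∈ acc ∨ (x ∈ l ∧ x ∈ sweep ∧ x ∉ comp) := by
    intro l
    induction l with
    | nil => simp
    | cons a l ih =>
      intro acc
      by_cases ha : a ∈ sweep ∧ a ∉ comp
      · simp only [List.foldl_cons, if_pos ha, ih, PySem.Set.mem_add, List.mem_cons]
        constructor
        · rintro ((h | rfl) | h)
          · exact Or.inl h
          · exact Or.inr ⟨Or.inl rfl, ha⟩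
          · exact Or.inr ⟨Or.inr h.1, h.2⟩
        · rintro (h | ⟨(rfl | h), hs⟩)
          · exact Or.inl (Or.inl h)
          · exact Or.inl (Or.inr rfl)
          · exact Or.inr ⟨h, hs⟩
      · simp only [List.foldl_cons, if_neg ha, ih, List.mem_cons]
        constructor
        · rintro (h | h)
          · exact Or.inl h
          · exact Or.inr ⟨Or.inr h.1, h.2⟩
        · rintro (h | ⟨(rfl | h), hs⟩)
          · exact Or.inl h
          · exact absurd hs ha
          · exact Or.inr ⟨h, hs⟩
  have outer : ∀ (cs acc : List String),
      x ∈ cs.foldl (fun acc node => (PySem.Dict.getD ⟨nm⟩ node []).foldl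
          (fun acc2 nb => if nb ∈ sweep ∧ nb ∉ comp then PySem.Set.add acc2 nb else acc2) acc) acc
        ↔ x ∈ acc ∨ ∃ node ∈ cs, x ∈ PySem.Dict.getD ⟨nm⟩ node [] ∧ x ∈ sweep ∧ x ∉ comp := by
    intro cs
    induction cs with
    | nil => simp
    | cons a cs ih =>
      intro acc
      simp only [List.foldl_cons, ih, inner, List.mem_cons]
      constructor
      · rintro ((h | h) | ⟨n, hn, h⟩)
        · exact Or.inl h
        · exact Or.inr ⟨a, Or.inl rfl, h⟩
        · exact Or.inr ⟨n, Or.inr hn, h⟩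
      · rintro (h | ⟨n, (rfl | hn), h⟩)
        · exact Or.inl (Or.inl h)
        · exact Or.inl (Or.inr h)
        · exact Or.inr ⟨n, hn, h⟩
  simpa [bNewSet, PySem.Set.empty] using outer comp PySem.Set.empty

theorem bIter_grow (sweep : List String) (nm : List (String × List String)) :
    ∀ k comp, ∀ x ∈ comp, x ∈ bIter sweep nm k comp := by
  intro k
  induction k with
  | zero => intro comp x hx; exact hx
  | succ k ih =>
    intro comp x hx
    rw [bIter]
    by_cases h : bNewSet sweep nm comp = []
    · simp only [h, reduceIte]
      exact hx
    · simp only [if_neg h]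
      exact ih _ x ((PySem.Set.mem_union _ _ _).mpr (Or.inl hx))

theorem bIter_min (sweep : List String) (nm : List (String × List String)) :
    ∀ k comp (T : String → Prop), ClosedP sweep nm T →
      (∀ x ∈ comp, T x) → (∀ x ∈ comp, x ∈ sweep) →
      ∀ x ∈ bIter sweep nm k comp, T x := by
  intro k
  induction k with
  | zero => intro comp _ _ hc _ x hx; exact hc x hx
  | succ k ih =>
    intro comp T hT hc hcs x hx
    rw [bIter] at hx
    by_cases h : bNewSet sweep nm comp = []
    · simp only [h, reduceIte] at hx
      exact hc x hx
    · simp only [if_neg h] at hx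
      have hnew : ∀ z ∈ bNewSet sweep nm comp, T z ∧ z ∈ sweep := by
        intro z hz
        rcases pvMemNewSet.mp hz with ⟨n, hn, hzn, hzs, _⟩
        exact ⟨hT n (hc n hn) (hcs n hn) z hzn hzs, hzs⟩
      refine ih _ T hT ?_ ?_ x hx
      · intro z hz
        rcases (PySem.Set.mem_union _ _ _).mp hz with hz | hz
        · exact hc z hz
        · exact (hnew z hz).1
      · intro z hz
        rcases (PySem.Set.mem_union _ _ _).mp hz with hz | hz
        · exact hcs z hz
        · exact (hnew z hz).2

-- pigeonhole: |sweep| expansion rounds always reach the fixpoint, so the result is closed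
theorem bIter_closed (sweep : List String) (nm : List (String × List String)) :
    ∀ k comp, (∀ x ∈ comp, x ∈ sweep) →
      sweep.length ≤ k + (sweep.filter (fun x => comp.contains x)).length →
      ClosedP sweep nm (· ∈ bIter sweep nm k comp) := by
  intro k
  induction k with
  | zero =>
    intro comp _ hlen x hx hxs y hy hys
    have hall : ∀ a ∈ sweep, a ∈ comp := by
      have h1 : (sweep.filter (fun x => comp.contains x)).length ≤ sweep.length :=
        List.length_filter_le _ _
      have h2 : (sweep.filter (fun x => comp.contains x)).length = sweep.length := by omega
      intro a ha
      have := (List.length_filter_eq_length_iff).mp h2 a ha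
      simpa using this
    exact hall y hys
  | succ k ih =>
    intro comp hcs hlen
    by_cases h : bNewSet sweep nm comp = []
    · -- fixpoint reached: the break fires, comp itself is closed
      intro x hx hxs y hy hys
      rw [bIter] at hx ⊢
      simp only [h, reduceIte] at hx ⊢
      by_contra hyc
      have : y ∈ bNewSet sweep nm comp := pvMemNewSet.mpr ⟨x, hx, hy, hys, hyc⟩
      rw [h] at this
      cases this
    · -- a new element exists: the filter count strictly grows
      rcases List.exists_mem_of_ne_nil _ h with ⟨w, hw⟩
      rcases pvMemNewSet.mp hw with ⟨n, _, _, hws, hwc⟩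
      have hlt : (sweep.filter (fun x => comp.contains x)).length <
          (sweep.filter (fun x => List.contains (PySem.Set.union comp (bNewSet sweep nm comp)) x)).length := by
        apply pvLenFilterLt _ _ _ ?_ w hws ?_ ?_
        · intro z hz
          have hzc : z ∈ comp := by simpa using hz
          simpa using (PySem.Set.mem_union _ _ _).mpr (Or.inl hzc)
        · simpa using (PySem.Set.mem_union _ _ _).mpr (Or.inr hw)
        · simpa using hwc
      intro x hx hxs y hy hys
      rw [bIter] at hx ⊢
      simp only [if_neg h] at hx ⊢
      refine ih (PySem.Set.union comp (bNewSet sweep nm comp)) ?_ (by omega) x hx hxs y hy hys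
      intro z hz
      rcases (PySem.Set.mem_union _ _ _).mp hz with hz | hz
      · exact hcs z hz
      · exact (pvMemNewSet.mp hz).choose_spec.2.2.1

theorem bClosure_grow (sweep : List String) (nm : List (String × List String)) (g : String) :
    g ∈ bClosure sweep nm g :=
  bIter_grow sweep nm sweep.length [g] g (by simp)

theorem bClosure_closed (sweep : List String) (nm : List (String × List String))
    (g : String) (hg : g ∈ sweep) : ClosedP sweep nm (· ∈ bClosure sweep nm g) := by
  apply bIter_closed
  · intro x hx
    rcases List.mem_cons.mp hx with rfl | hx
    · exact hg
    · cases hx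
  · omega

theorem seed_iff (sweep : List String) (nm : List (String × List String))
    (VA VB : List String) (g : String) (hg : g ∈ sweep)
    (hiff : ∀ x, x ∈ VA ↔ x ∈ VB)
    (hclA : ClosedP sweep nm (· ∈ VA)) (_hsw : ∀ x ∈ VA, x ∈ sweep) :
    ∀ x, x ∈ aDfs sweep nm VA [g] ↔ x ∈ PySem.Set.union VB (bClosure sweep nm g) := by
  have hCclosed := bClosure_closed sweep nm g hg
  have hgC := bClosure_grow sweep nm g
  have hRAclosed : ClosedP sweep nm (· ∈ aDfs sweep nm VA [g]) := by
    apply aDfs_closed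
    intro x hx hxs y hy hys
    exact Or.inl (hclA x hx hxs y hy hys)
  intro x
  constructor
  · intro hx
    rw [PySem.Set.mem_union]
    refine aDfs_min sweep nm VA [g] (fun z => z ∈ VB ∨ z ∈ bClosure sweep nm g)
      ?_ ?_ ?_ x hx
    · intro z hz hzs y hy hys
      rcases hz with hz | hz
      · exact Or.inl ((hiff y).mp (hclA z ((hiff z).mpr hz) hzs y hy hys))
      · exact Or.inr (hCclosed z hz hzs y hy hys)
    · intro z hz
      exact Or.inl ((hiff z).mp hz)
    · intro z hz _
      rcases List.mem_cons.mp hz with rfl | hz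
      · exact Or.inr hgC
      · cases hz
  · intro hx
    rcases (PySem.Set.mem_union _ _ _).mp hx with hv | hC
    · exact aDfs_grow sweep nm VA [g] x ((hiff x).mpr hv)
    · refine bIter_min sweep nm sweep.length [g] (· ∈ aDfs sweep nm VA [g]) hRAclosed
        ?_ ?_ x hC
      · intro z hz
        rcases List.mem_cons.mp hz with rfl | hz
        · exact aDfs_stack sweep nm VA _ z (List.mem_singleton.mpr rfl) hg
        · cases hz
      · intro z hz
        rcases List.mem_cons.mp hz with rfl | hz
        · exact hg
        · cases hz

theorem outer_fold (sweep : List String) (nm : List (String × List String)) :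
    ∀ (qs : List String) (VA VB : List String) (cnt : Int),
      (∀ x, x ∈ VA ↔ x ∈ VB) →
      ClosedP sweep nm (· ∈ VA) →
      (∀ x ∈ VA, x ∈ sweep) →
      (qs.foldl (fun (st : List String × Int) g =>
          if g ∉ sweep ∨ g ∈ st.1 then st
          else (aDfs sweep nm st.1 [g], st.2 + 1)) (VA, cnt)).2 =
      (qs.foldl (fun (st : List String × Int) g =>
          if g ∈ sweep ∧ g ∉ st.1 then
            (PySem.Set.union st.1 (bClosure sweep nm g), st.2 + 1)
          else st) (VB, cnt)).2 := by
  intro qs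
  induction qs with
  | nil => intro VA VB cnt _ _ _; rfl
  | cons g qs ih =>
    intro VA VB cnt hiff hclA hsw
    by_cases hc : g ∈ sweep ∧ g ∉ VA
    · have hcB : g ∈ sweep ∧ g ∉ VB := ⟨hc.1, fun hb => hc.2 ((hiff g).mpr hb)⟩
      simp only [List.foldl_cons]
      rw [if_neg (by tauto), if_pos hcB]
      apply ih
      · exact seed_iff sweep nm VA VB g hc.1 hiff hclA hsw
      · apply aDfs_closed
        intro x hx hxs y hy hys
        exact Or.inl (hclA x hx hxs y hy hys)
      · intro x hx
        rcases aDfs_bound sweep nm VA [g] x hx with h | h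
        · exact hsw x h
        · exact h
    · have hcB : ¬(g ∈ sweep ∧ g ∉ VB) := fun hb => hc ⟨hb.1, fun ha => hb.2 ((hiff g).mp ha)⟩
      simp only [List.foldl_cons]
      rw [if_pos (by tauto), if_neg hcB]
      exact ih VA VB cnt hiff hclA hsw

-- ===== VERDICT (by name: the statement is the Claim_ definition above) =====
theorem count_sweep_events_py_spec : Claim_equal_count_sweep_events_py := by
  intro q s nm _
  unfold Spec_count_sweep_events_py count_sweep_events_py count_sweep_events_py_alt
  exact outer_fold s nm q [] [] 0 (by simp) (by intro x hx; cases hx) (by intro x hx; cases hx)
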